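-- pv_equiv track=rewrite | github.com/kinger310/learnpy | learn_da/learn_groupby.py | longestForward
-- ===== SOURCE A (Python) =====
-- def longestForward(a_list):
--     neg_longest = 1
--     neg_count = 0
--     pos_longest = 1
--     pos_count = 0
--     for i, x in enumerate(a_list):
--         if x == 0:
--             continue
--         elif x < 0:
--             neg_count += 1
--             if neg_count > neg_longest:
--                 neg_longest = neg_count
--             pos_count = 0
--         else:
--             pos_count += 1
--             if pos_count > pos_longest:
--                 pos_longest = pos_count
--             neg_count = 0
--     return neg_longest, pos_longest
-- ===== SOURCE B (Python) =====
-- def _longest(xs, neg):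
--     # longest length of a maximal same-sign run whose sign matches `neg`, floored at 1
--     best = 1
--     i = 0
--     while i < len(xs):
--         j = i + 1
--         while j < len(xs) and (xs[j] < 0) == (xs[i] < 0):
--             j += 1
--         if (xs[i] < 0) == neg:
--             best = max(best, j - i)
--         i = j
--     return best
--
-- def longestForward(a_list):
--     xs = [x for x in a_list if x != 0]
--     return _longest(xs, True), _longest(xs, False)
-- ===== Notes on version B (the rewrite author's own statement) =====
-- stated objective: alternative
-- what changed: Replaces A's single pass with four interleaved counters by a run decomposition: filter out zeros, then walk the list one maximal same-sign run at a time, keeping the max run length (floored at 1) in a separate scan per sign.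
import Mathlib
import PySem

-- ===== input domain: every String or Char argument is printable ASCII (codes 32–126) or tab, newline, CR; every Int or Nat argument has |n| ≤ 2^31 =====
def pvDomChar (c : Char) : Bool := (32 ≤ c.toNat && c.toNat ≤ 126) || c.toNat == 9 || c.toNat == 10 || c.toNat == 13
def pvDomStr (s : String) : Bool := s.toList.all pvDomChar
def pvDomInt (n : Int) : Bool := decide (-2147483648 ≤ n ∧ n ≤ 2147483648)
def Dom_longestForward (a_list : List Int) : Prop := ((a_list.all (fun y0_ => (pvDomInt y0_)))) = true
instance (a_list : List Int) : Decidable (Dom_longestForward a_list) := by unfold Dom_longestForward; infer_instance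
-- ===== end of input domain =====

-- B replaces A's one-pass four-counter scan by a zero-filter plus a run-at-a-time scan over
-- maximal same-sign runs, one scan per sign (alternative structure, same O(n) cost).

-- ===== PORT A =====
-- one loop step of A's for-body (x is the current element; the enumerate index is unused)
def stepA (s : Int × Int × Int × Int) (x : Int) : Int × Int × Int × Int :=
  if x == 0 then s
  else if x < 0 then
    let nc := s.2.1 + 1
    let nl := if nc > s.1 then nc else s.1
    (nl, nc, s.2.2.1, 0)
  else
    let pc := s.2.2.2 + 1
    let pl := if pc > s.2.2.1 then pc else s.2.2.1
    (s.1, 0, pl, pc)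

def longestForward (a_list : List Int) : Int × Int :=
  let s := (PySem.List.enumerate a_list).foldl (fun st p => stepA st p.2) (1, 0, 1, 0)
  (s.1, s.2.2.1)

-- ===== PORT B =====
-- Source B's _longest: the outer while loop walks the list one maximal same-sign run at a time,
-- keeping the running best; the inner index-advancing loop over equal signs is exactly
-- takeWhile/dropWhile of that sign predicate, and j - i is 1 + the takeWhile length.
def longestAux (xs : List Int) (neg : Bool) (best : Int) : Int :=
  match xs with
  | [] => best
  | a :: rest =>
      let p := fun x : Int => decide (x < 0) == decide (a < 0)
      let n : Int := 1 + (rest.takeWhile p).length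
      let best' := if decide (a < 0) == neg then max best n else best
      longestAux (rest.dropWhile p) neg best'
termination_by xs.length
decreasing_by
  simpa using Nat.lt_succ_of_le (rest.length_dropWhile_le _)

def longestForward_alt (a_list : List Int) : Int × Int :=
  let xs := a_list.filter (fun x => decide (x ≠ 0))
  (longestAux xs true 1, longestAux xs false 1)

-- ===== PRECONDITION & SPEC =====
def Spec_longestForward (a_list : List Int) (out : Int × Int) : Prop := out = longestForward_alt a_list
instance (a_list : List Int) (out : Int × Int) : Decidable (Spec_longestForward a_list out) := by unfold Spec_longestForward; infer_instance

-- ===== CLAIM (what is proved, stated in full; the proofs are below) =====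
def Claim_equal_longestForward : Prop := ∀ (a_list : List Int), Dom_longestForward a_list → Spec_longestForward a_list (longestForward a_list)

-- ===== LEMMAS AND PROOFS =====

-- unfolding lemma for longestAux on a cons cell
theorem longestAux_cons (a : Int) (rest : List Int) (b : Bool) (best : Int) :
    longestAux (a :: rest) b best =
      longestAux (rest.dropWhile (fun x : Int => decide (x < 0) == decide (a < 0))) b
        (if decide (a < 0) == b
         then max best (1 + ((rest.takeWhile (fun x : Int => decide (x < 0) == decide (a < 0))).length : Int))
         else best) := by
  rw [longestAux.eq_def]

-- folding over enumerate while ignoring the index is folding over the list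
theorem foldl_enumerate_stepA (xs : List Int) (st : Int × Int × Int × Int) (i : Int) :
    (PySem.List.enumerate xs i).foldl (fun st p => stepA st p.2) st = xs.foldl stepA st := by
  induction xs generalizing st i with
  | nil => simp [PySem.List.enumerate]
  | cons a t ih => simp [PySem.List.enumerate_cons, ih]

-- zeros leave A's state unchanged, so A's fold equals the fold over the zero-filtered list
theorem foldl_filter_stepA (xs : List Int) (st : Int × Int × Int × Int) :
    xs.foldl stepA st = (xs.filter (fun x => decide (x ≠ 0))).foldl stepA st := by
  induction xs generalizing st with
  | nil => rfl
  | cons a t ih =>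
    by_cases h : a = 0
    · subst h; simpa [stepA] using ih st
    · simp only [List.foldl_cons, List.filter_cons, h, decide_true, ne_eq,
        not_false_iff, List.foldl_cons]
      simp [ih]

-- consuming a whole negative run from A's state
theorem runNeg (r : List Int) : ∀ (a : Int), a < 0 → (∀ x ∈ r, x < 0) →
    ∀ (nl nc pl pc : Int) (t : List Int),
    ((a :: r) ++ t).foldl stepA (nl, nc, pl, pc)
      = t.foldl stepA (max nl (nc + 1 + r.length), nc + 1 + r.length, pl, 0) := by
  induction r with
  | nil =>
    intro a ha _ nl nc pl pc t
    have ha' : ¬ (a = 0) := by omega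
    simp only [List.cons_append, List.nil_append, List.foldl_cons, stepA,
      beq_iff_eq, ha', if_false, ha, if_true]
    congr 2 <;> (simp; try omega)
  | cons b r ih =>
    intro a ha hall nl nc pl pc t
    have ha' : ¬ (a = 0) := by omega
    have hb : b < 0 := hall b (by simp)
    have step : ((a :: b :: r) ++ t).foldl stepA (nl, nc, pl, pc)
        = ((b :: r) ++ t).foldl stepA
            (if nc + 1 > nl then nc + 1 else nl, nc + 1, pl, 0) := by
      simp [stepA, ha', ha]
    rw [step, ih b hb (fun x hx => hall x (by simp [hx]))]
    congr 2 <;> (simp; try omega)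

-- consuming a whole positive run from A's state
theorem runPos (r : List Int) : ∀ (a : Int), 0 < a → (∀ x ∈ r, 0 < x) →
    ∀ (nl nc pl pc : Int) (t : List Int),
    ((a :: r) ++ t).foldl stepA (nl, nc, pl, pc)
      = t.foldl stepA (nl, 0, max pl (pc + 1 + r.length), pc + 1 + r.length) := by
  induction r with
  | nil =>
    intro a ha _ nl nc pl pc t
    have ha' : ¬ (a = 0) := by omega
    have ha'' : ¬ (a < 0) := by omega
    simp only [List.cons_append, List.nil_append, List.foldl_cons, stepA,
      beq_iff_eq, ha', if_false, ha'', if_false]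
    congr 2 <;> (simp; try omega)
  | cons b r ih =>
    intro a ha hall nl nc pl pc t
    have ha' : ¬ (a = 0) := by omega
    have ha'' : ¬ (a < 0) := by omega
    have hb : 0 < b := hall b (by simp)
    have step : ((a :: b :: r) ++ t).foldl stepA (nl, nc, pl, pc)
        = ((b :: r) ++ t).foldl stepA
            (nl, 0, if pc + 1 > pl then pc + 1 else pl, pc + 1) := by
      simp [stepA, ha', ha'']
    rw [step, ih b hb (fun x hx => hall x (by simp [hx]))]
    congr 2 <;> (simp; try omega)

-- main invariant: on a zero-free list, A's fold components are B's accumulator scans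
theorem main_inv : ∀ (n : Nat) (xs : List Int), xs.length ≤ n → (∀ x ∈ xs, x ≠ 0) →
    ∀ (nl nc pl pc : Int),
    (∀ a, xs.head? = some a → (a < 0 → nc = 0) ∧ (0 < a → pc = 0)) →
    (xs.foldl stepA (nl, nc, pl, pc)).1 = longestAux xs true nl ∧
    (xs.foldl stepA (nl, nc, pl, pc)).2.2.1 = longestAux xs false pl := by
  intro n
  induction n with
  | zero =>
    intro xs hlen _ nl nc pl pc _
    have : xs = [] := by cases xs <;> simp_all
    subst this
    simp [longestAux]
  | succ n ih =>
    intro xs hlen hnz nl nc pl pc hhead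
    cases xs with
    | nil => simp [longestAux]
    | cons a rest =>
      set p := fun x : Int => decide (x < 0) == decide (a < 0) with hp
      have hsplit : a :: rest = (a :: rest.takeWhile p) ++ rest.dropWhile p := by
        simp [List.takeWhile_append_dropWhile]
      have hna : a ≠ 0 := hnz a (by simp)
      have htlen : (rest.dropWhile p).length ≤ n := by
        have := rest.length_dropWhile_le p
        simp at hlen; omega
      have htnz : ∀ x ∈ rest.dropWhile p, x ≠ 0 := fun x hx =>
        hnz x (List.mem_cons_of_mem _ ((rest.dropWhile_sublist p).mem hx))
      have hrun : ∀ x ∈ rest.takeWhile p, (decide (x < 0) == decide (a < 0)) = true := by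
        intro x hx
        have : p x = true := List.mem_takeWhile_imp hx
        simpa [hp] using this
      have hheadt : ∀ b, (rest.dropWhile p).head? = some b →
          (decide (b < 0) == decide (a < 0)) = false := by
        intro b hb
        have h := List.head?_dropWhile_not p rest
        rw [hb] at h
        simpa [hp] using h
      by_cases hneg : a < 0
      · -- the head run is negative; by maximality the remainder starts positive (or is empty)
        have hnc : nc = 0 := ((hhead a rfl).1 hneg)
        have hallr : ∀ x ∈ rest.takeWhile p, x < 0 := by
          intro x hx
          have h1 := hrun x hx
          simp [hneg] at h1
          exact h1
        have hfold := runNeg (rest.takeWhile p) a hneg hallr nl nc pl pc (rest.dropWhile p)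
        rw [hsplit, hfold, hnc]
        have hht : ∀ b, (rest.dropWhile p).head? = some b →
            ((b < 0 → (0 + 1 + ((rest.takeWhile p).length : Int)) = 0) ∧ (0 < b → (0:Int) = 0)) := by
          intro b hb
          have h1 := hheadt b hb
          simp [hneg] at h1
          exact ⟨fun hb' => by omega, fun _ => rfl⟩
        have hIH := ih (rest.dropWhile p) htlen htnz
          (max nl (0 + 1 + ((rest.takeWhile p).length : Int))) (0 + 1 + ((rest.takeWhile p).length : Int)) pl 0 hht
        rcases hIH with ⟨h1, h2⟩
        rw [h1, h2]
        constructor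
        · rw [← hsplit, longestAux_cons, ← hp]
          simp only [hneg, decide_true, beq_self_eq_true, if_true]
          congr 1 <;> omega
        · rw [← hsplit, longestAux_cons, ← hp]
          simp [hneg]
      · -- the head run is positive
        have hpos : 0 < a := by omega
        have hpc : pc = 0 := ((hhead a rfl).2 hpos)
        have hallr : ∀ x ∈ rest.takeWhile p, 0 < x := by
          intro x hx
          have h1 := hrun x hx
          simp [hneg] at h1
          have : x ≠ 0 := hnz x (List.mem_cons_of_mem _ ((rest.takeWhile_sublist p).mem hx))
          omega
        have hfold := runPos (rest.takeWhile p) a hpos hallr nl nc pl pc (rest.dropWhile p)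
        rw [hsplit, hfold, hpc]
        have hht : ∀ b, (rest.dropWhile p).head? = some b →
            ((b < 0 → (0:Int) = 0) ∧ (0 < b → (0 + 1 + ((rest.takeWhile p).length : Int)) = 0)) := by
          intro b hb
          have h1 := hheadt b hb
          simp [hneg] at h1
          exact ⟨fun _ => rfl, fun hb' => by omega⟩
        have hIH := ih (rest.dropWhile p) htlen htnz
          nl 0 (max pl (0 + 1 + ((rest.takeWhile p).length : Int))) (0 + 1 + ((rest.takeWhile p).length : Int)) hht
        rcases hIH with ⟨h1, h2⟩
        rw [h1, h2]
        constructor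
        · rw [← hsplit, longestAux_cons, ← hp]
          simp [hneg]
        · rw [← hsplit, longestAux_cons, ← hp]
          simp only [hneg, decide_false, beq_self_eq_true, if_true]
          congr 1 <;> omega

-- ===== VERDICT (by name: the statement is the Claim_ definition above) =====
theorem longestForward_spec : Claim_equal_longestForward := by
  intro a_list _
  unfold Spec_longestForward longestForward longestForward_alt
  rw [foldl_enumerate_stepA, foldl_filter_stepA]
  set xs := a_list.filter (fun x => decide (x ≠ 0)) with hxs
  have hnz : ∀ x ∈ xs, x ≠ 0 := by
    intro x hx
    rw [hxs] at hx
    simpa using (List.of_mem_filter hx)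
  have h := main_inv xs.length xs le_rfl hnz 1 0 1 0
    (by intro a _; exact ⟨fun _ => rfl, fun _ => rfl⟩)
  rcases h with ⟨h1, h2⟩
  simp only []
  rw [h1, h2]
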